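-- pv_equiv track=rewrite | github.com/dulithahsith/Project_Euler | iee2.py | encrypted_hash
-- ===== SOURCE A (Python) =====
-- def encrypted_hash(s):
--     # Step 1: Prime assignments for each letter a-z
--     primes = [2, 3, 5, 7, 11, 13, 17, 19, 23, 29, 31, 37, 41, 43, 47,
--               53, 59, 61, 67, 71, 73, 79, 83, 89, 97, 101]
--
--     # Step 2: Frequency mapping
--     frequency = {}
--     for char in s:
--         if char in frequency:
--             frequency[char] += 1
--         else:
--             frequency[char] = 1
--
--     # Step 3: Calculate transformed values and final hash
--     total_hash = 0
--     MOD = 10**9 + 7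
--
--     for i, char in enumerate(s):
--         position = i + 1  # 1-based index
--         # Get prime for the character
--         prime_value = primes[ord(char) - ord('a')]
--         freq = frequency[char]  # Get frequency of the character
--
--         # Calculate the transformed value
--         transformed_value = prime_value * freq * (position ** 2)
--
--         # Add transformed value to total_hash
--         total_hash = (total_hash + transformed_value) % MOD
--
--     return total_hash
-- ===== SOURCE B (Python) =====
-- def encrypted_hash(s):
--     primes = [2, 3, 5, 7, 11, 13, 17, 19, 23, 29, 31, 37, 41, 43, 47,
--               53, 59, 61, 67, 71, 73, 79, 83, 89, 97, 101]
--     MOD = 10**9 + 7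
--     total = 0
--     # group by distinct character: one term per distinct char instead of one per position
--     for c in dict.fromkeys(s):
--         sq = [(i + 1) ** 2 for i, ch in enumerate(s) if ch == c]
--         total += primes[ord(c) - ord('a')] * len(sq) * sum(sq)
--     return total % MOD
-- ===== Notes on version B (the rewrite author's own statement) =====
-- stated objective: alternative
-- what changed: B regroups the sum by distinct character (one term prime*freq*sum-of-squared-positions per distinct char, mod taken once at the end) instead of A's per-position loop with a prebuilt frequency dict and a running mod.
import Mathlib
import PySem

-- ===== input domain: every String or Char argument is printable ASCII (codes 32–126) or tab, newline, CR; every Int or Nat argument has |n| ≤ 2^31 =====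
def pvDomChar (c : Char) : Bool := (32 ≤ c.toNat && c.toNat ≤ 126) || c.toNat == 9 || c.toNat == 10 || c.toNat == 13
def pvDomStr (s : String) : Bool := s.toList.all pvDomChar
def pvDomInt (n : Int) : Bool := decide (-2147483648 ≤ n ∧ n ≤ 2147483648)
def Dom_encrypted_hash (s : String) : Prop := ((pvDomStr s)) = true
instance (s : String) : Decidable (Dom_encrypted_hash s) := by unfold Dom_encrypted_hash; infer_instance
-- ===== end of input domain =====

-- B regroups the position-wise sum by distinct character and takes the modulus once at the end
-- (objective: alternative decomposition, same exact result).

-- ===== PORT A =====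
def pvPrimes : List Int := [2, 3, 5, 7, 11, 13, 17, 19, 23, 29, 31, 37, 41, 43, 47,
                            53, 59, 61, 67, 71, 73, 79, 83, 89, 97, 101]

def encrypted_hash (s : String) : Int :=
  let frequency : PySem.Dict Char Int :=
    s.toList.foldl (fun d char =>
      if d.contains char then d.insert char (d.getD char 0 + 1) else d.insert char 1)
      PySem.Dict.empty
  let MOD : Int := 10 ^ 9 + 7
  (PySem.List.enumerate s.toList 0).foldl (fun total_hash p =>
      let position : Int := p.1 + 1
      -- primes[ord(char) - ord('a')]: in range (possibly negative, Python wraparound) under Pre_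
      let prime_value : Int := (PySem.List.pyGet? pvPrimes ((p.2.toNat : Int) - 97)).getD 0
      let freq : Int := frequency.getD p.2 0  -- key always present (char occurs in s)
      let transformed_value := prime_value * freq * position ^ 2
      PySem.Int.mod (total_hash + transformed_value) MOD) 0

-- ===== PORT B =====
def encrypted_hash_alt (s : String) : Int :=
  let MOD : Int := 10 ^ 9 + 7
  let total :=
    (PySem.List.dedup s.toList).foldl (fun total c =>
      let sq := ((PySem.List.enumerate s.toList 0).filter (fun p => p.2 == c)).map
                  (fun p => (p.1 + 1) ^ 2)
      total + (PySem.List.pyGet? pvPrimes ((c.toNat : Int) - 97)).getD 0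
                * (sq.length : Int) * sq.sum) 0
  PySem.Int.mod total MOD

-- ===== PRECONDITION & SPEC =====
-- Pre_ excludes exactly the strings on which A raises IndexError: a character whose code is
-- below 71 or above 122 makes primes[ord(c)-97] an out-of-range index; codes 71..96 hit
-- Python's negative-index wraparound, on which A returns a value, and those stay inside Pre_.
def Pre_encrypted_hash (s : String) : Prop := s.toList.all (fun c => 71 ≤ c.toNat && c.toNat ≤ 122) = true
instance (s : String) : Decidable (Pre_encrypted_hash s) := by unfold Pre_encrypted_hash; infer_instance
def pvWitness_encrypted_hash : String := "abcZa"
def Spec_encrypted_hash (s : String) (out : Int) : Prop := out = encrypted_hash_alt s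
instance (s : String) (out : Int) : Decidable (Spec_encrypted_hash s out) := by unfold Spec_encrypted_hash; infer_instance

-- ===== CLAIM (what is proved, stated in full; the proofs are below) =====
def Claim_equal_encrypted_hash : Prop := ∀ (s : String), Dom_encrypted_hash s → Pre_encrypted_hash s → Spec_encrypted_hash s (encrypted_hash s)

-- ===== LEMMAS AND PROOFS =====

-- A's hand-rolled frequency loop builds Counter(s).
theorem pv_freq_eq_counter (l : List Char) :
    l.foldl (fun d char =>
      if d.contains char then d.insert char (d.getD char 0 + 1) else d.insert char 1)
      PySem.Dict.empty = PySem.Dict.counter l := by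
  have hstep : (fun (d : PySem.Dict Char Int) char =>
      if d.contains char then d.insert char (d.getD char 0 + 1) else d.insert char 1)
      = fun d char => d.modify char 0 (· + 1) := by
    funext d c
    by_cases h : d.contains c = true
    · simp [h, PySem.Dict.modify]
    · have h' : d.contains c = false := by simpa using h
      have hget : d.getD c 0 = 0 := by
        have : d.get? c = none := by
          rw [PySem.Dict.get?_eq_none_iff_not_mem_keys]
          intro hmem
          rw [PySem.Dict.contains_eq_decide_mem_keys] at h'
          simp [hmem] at h'
        simp [PySem.Dict.getD, this]
      simp [h', PySem.Dict.modify, hget]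
  rw [hstep]
  rfl

-- folding (acc + t x) % M equals adding everything and taking % M once
theorem pv_foldl_mod (M : Int) (hM : 0 < M) {α : Type} (t : α → Int) (e : List α) :
    ∀ acc : Int, e.foldl (fun a x => PySem.Int.mod (a + t x) M) (PySem.Int.mod acc M)
      = PySem.Int.mod (acc + (e.map t).sum) M := by
  induction e with
  | nil => intro acc; simp
  | cons x e ih =>
      intro acc
      have h1 : PySem.Int.mod (PySem.Int.mod acc M + t x) M = PySem.Int.mod (acc + t x) M := by
        rw [PySem.Int.mod_eq_emod_of_pos hM, PySem.Int.mod_eq_emod_of_pos hM,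
            PySem.Int.mod_eq_emod_of_pos hM, Int.emod_add_emod]
      rw [List.foldl_cons, h1, ih (acc + t x), List.map_cons, List.sum_cons]
      congr 1
      ring

-- specialisation to A's initial accumulator 0
theorem pv_foldl_mod_zero (M : Int) (hM : 0 < M) {α : Type} (t : α → Int) (e : List α) :
    e.foldl (fun a x => PySem.Int.mod (a + t x) M) 0 = PySem.Int.mod ((e.map t).sum) M := by
  have h := pv_foldl_mod M hM t e 0
  rw [zero_add] at h
  rw [← h]
  have h0 : PySem.Int.mod 0 M = 0 := by
    rw [PySem.Int.mod_eq_emod_of_pos hM]; simp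
  rw [h0]

-- the filtered-out character contributes nothing
theorem pv_ssq_not_mem {w : Int → Int} (e : List (Int × Char)) (c : Char)
    (h : c ∉ e.map (·.2)) :
    ((e.filter (fun p => p.2 == c)).map (fun p => w p.1)).sum = 0 := by
  have : e.filter (fun p => p.2 == c) = [] := by
    rw [List.filter_eq_nil_iff]
    intro p hp hpc
    have hpc' : p.2 = c := by simpa using hpc
    exact h (hpc' ▸ List.mem_map_of_mem hp)
  simp [this]

-- the grouping identity: a per-position sum regrouped as a per-distinct-character sum
theorem pv_group (f : Char → Int) (w : Int → Int) (e : List (Int × Char)) :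
    (e.map (fun p => f p.2 * w p.1)).sum
      = ∑ c ∈ (e.map (·.2)).toFinset,
          f c * ((e.filter (fun p => p.2 == c)).map (fun p => w p.1)).sum := by
  induction e with
  | nil => simp
  | cons p e ih =>
      obtain ⟨i, c⟩ := p
      have hsum : ∀ x : Char,
          ((((i, c) :: e).filter (fun q => q.2 == x)).map (fun q => w q.1)).sum
            = (if x = c then w i else 0) + ((e.filter (fun q => q.2 == x)).map (fun q => w q.1)).sum := by
        intro x
        by_cases hx : x = c
        · subst hx; simp
        · simp [Ne.symm hx, hx]
      have hR : (∑ x ∈ insert c (e.map (·.2)).toFinset,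
            f x * ((((i, c) :: e).filter (fun q => q.2 == x)).map (fun q => w q.1)).sum)
          = f c * w i + ∑ x ∈ (e.map (·.2)).toFinset,
              f x * ((e.filter (fun q => q.2 == x)).map (fun q => w q.1)).sum := by
        calc (∑ x ∈ insert c (e.map (·.2)).toFinset,
              f x * ((((i, c) :: e).filter (fun q => q.2 == x)).map (fun q => w q.1)).sum)
            = ∑ x ∈ insert c (e.map (·.2)).toFinset,
                ((if x = c then f x * w i else 0)
                  + f x * ((e.filter (fun q => q.2 == x)).map (fun q => w q.1)).sum) := by
              apply Finset.sum_congr rfl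
              intro x _
              rw [hsum x]
              by_cases hx : x = c
              · simp only [if_pos hx]
                ring
              · simp [hx]
          _ = (∑ x ∈ insert c (e.map (·.2)).toFinset, if x = c then f x * w i else 0)
                + ∑ x ∈ insert c (e.map (·.2)).toFinset,
                    f x * ((e.filter (fun q => q.2 == x)).map (fun q => w q.1)).sum :=
              Finset.sum_add_distrib
          _ = f c * w i + ∑ x ∈ insert c (e.map (·.2)).toFinset,
                    f x * ((e.filter (fun q => q.2 == x)).map (fun q => w q.1)).sum := by
              rw [Finset.sum_ite_eq' (insert c (e.map (·.2)).toFinset) c (fun x => f x * w i)]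
              simp
          _ = f c * w i + ∑ x ∈ (e.map (·.2)).toFinset,
                    f x * ((e.filter (fun q => q.2 == x)).map (fun q => w q.1)).sum := by
              by_cases hc : c ∈ (e.map (·.2)).toFinset
              · rw [Finset.insert_eq_self.mpr hc]
              · rw [Finset.sum_insert hc,
                    pv_ssq_not_mem e c (by simpa using hc)]
                ring_nf
      simp only [List.map_cons, List.sum_cons, ih, List.toFinset_cons]
      rw [hR]

-- sum over PySem.List.dedup = Finset sum over the distinct characters
theorem pv_dedup_sum (g : Char → Int) (m : List Char) :
    ((PySem.List.dedup m).map g).sum = ∑ c ∈ m.toFinset, g c := by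
  have hnd : (PySem.List.dedup m).Nodup := PySem.List.nodup_dedup m
  have hfs : (PySem.List.dedup m).toFinset = m.toFinset := by
    ext c; simp
  rw [← List.sum_toFinset g hnd, hfs]

-- the filtered squared-positions list has length = count of the character
theorem pv_len_filter (l : List Char) (c : Char) :
    ((PySem.List.enumerate l 0).filter (fun p => p.2 == c)).length = l.count c := by
  rw [← List.countP_eq_length_filter]
  have : l.count c = List.countP (fun x => x == c) (List.map (fun p => p.2) (PySem.List.enumerate l 0)) := by
    rw [PySem.List.map_snd_enumerate]; rfl
  rw [this, List.countP_map]
  rfl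

-- ===== VERDICT (by name: the statement is the Claim_ definition above) =====
theorem encrypted_hash_spec : Claim_equal_encrypted_hash := by
  intro s _ _
  unfold Spec_encrypted_hash encrypted_hash encrypted_hash_alt
  simp only [pv_freq_eq_counter]
  set l := s.toList with hl
  set M : Int := 10 ^ 9 + 7 with hM
  have hMpos : (0 : Int) < M := by norm_num [hM]
  set prime : Char → Int := fun c => (PySem.List.pyGet? pvPrimes ((c.toNat : Int) - 97)).getD 0 with hprime
  -- A side: one mod at the end of a plain sum
  have hA : (PySem.List.enumerate l 0).foldl (fun total_hash p =>
        PySem.Int.mod (total_hash + prime p.2 * (PySem.Dict.counter l).getD p.2 0 * (p.1 + 1) ^ 2) M) 0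
      = PySem.Int.mod (((PySem.List.enumerate l 0).map
          (fun p => (prime p.2 * (l.count p.2 : Int)) * (p.1 + 1) ^ 2)).sum) M := by
    have hmap : (PySem.List.enumerate l 0).map
          (fun p => prime p.2 * (PySem.Dict.counter l).getD p.2 0 * (p.1 + 1) ^ 2)
        = (PySem.List.enumerate l 0).map
          (fun p => (prime p.2 * (l.count p.2 : Int)) * (p.1 + 1) ^ 2) := by
      apply List.map_congr_left
      intro p _
      rw [PySem.Dict.getD_counter]
    rw [pv_foldl_mod_zero M hMpos
      (fun p : Int × Char => prime p.2 * (PySem.Dict.counter l).getD p.2 0 * (p.1 + 1) ^ 2)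
      (PySem.List.enumerate l 0), hmap]
  -- B side: foldl of additions is a sum
  have hB : (PySem.List.dedup l).foldl (fun total c =>
        total + prime c
          * ((((PySem.List.enumerate l 0).filter (fun p => p.2 == c)).map (fun p => (p.1 + 1) ^ 2)).length : Int)
          * (((PySem.List.enumerate l 0).filter (fun p => p.2 == c)).map (fun p => (p.1 + 1) ^ 2)).sum) 0
      = ∑ c ∈ l.toFinset, (prime c * (l.count c : Int))
          * (((PySem.List.enumerate l 0).filter (fun p => p.2 == c)).map (fun p => (p.1 + 1) ^ 2)).sum := by
    rw [PySem.List.foldl_add, zero_add]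
    rw [pv_dedup_sum]
    apply Finset.sum_congr rfl
    intro c _
    rw [List.length_map, pv_len_filter]
  rw [hA, hB]
  have hg := pv_group (fun c => prime c * (l.count c : Int)) (fun i => (i + 1) ^ 2)
    (PySem.List.enumerate l 0)
  rw [PySem.List.map_snd_enumerate] at hg
  rw [hg]
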